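-- pv_equiv track=rewrite | github.com/MayroseLab/Keren | python/utils/sampling/pda.py | align_seq_to_aln
-- ===== SOURCE A (Python) =====
-- def align_seq_to_aln(sequence, alignment):
--     seq_to_aln_map = dict()
--     accumulated_gaps = 0
--     for i in range(len(sequence)):
--         j = i + accumulated_gaps
--         while alignment[j] == '-':
--             j += 1
--             accumulated_gaps += 1
--         seq_to_aln_map[i+1] = j+1
--     return seq_to_aln_map
-- ===== SOURCE B (Python) =====
-- def align_seq_to_aln(sequence, alignment):
--     positions = [j + 1 for j, ch in enumerate(alignment) if ch != '-']
--     return {i + 1: positions[i] for i in range(len(sequence))}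
-- ===== Notes on version B (the rewrite author's own statement) =====
-- stated objective: simpler
-- what changed: Replaces A's fused walk with a stateful gap counter and inner gap-skipping while-loop by one pass that lists the 1-based alignment columns of all non-gap characters and a comprehension that looks positions up by index.
import Mathlib
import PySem

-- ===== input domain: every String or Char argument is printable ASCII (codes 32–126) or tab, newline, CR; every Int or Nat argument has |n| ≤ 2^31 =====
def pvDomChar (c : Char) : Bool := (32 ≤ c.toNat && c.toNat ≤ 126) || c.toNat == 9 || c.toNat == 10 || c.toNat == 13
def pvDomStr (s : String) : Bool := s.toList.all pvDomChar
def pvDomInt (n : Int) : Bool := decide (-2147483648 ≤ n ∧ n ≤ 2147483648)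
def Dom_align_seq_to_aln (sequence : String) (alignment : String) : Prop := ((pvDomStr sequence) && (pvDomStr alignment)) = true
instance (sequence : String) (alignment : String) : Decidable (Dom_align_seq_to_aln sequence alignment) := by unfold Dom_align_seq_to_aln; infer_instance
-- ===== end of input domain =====

-- B replaces A's fused walk (gap counter + inner gap-skipping while loop) by a non-gap
-- column index list built once plus a lookup comprehension; objective: simpler.

-- ===== PORT A =====
-- the inner `while alignment[j] == '-': j += 1`; stops at the list end
-- (within Pre_ the index never leaves the range; Python raises IndexError outside Pre_)
def skipGapsA (cs : List Char) (j : Nat) : Nat :=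
  if h : j < cs.length then
    if cs[j] = '-' then skipGapsA cs (j + 1) else j
  else j
termination_by cs.length - j

-- the `for i in range(len(sequence))` loop; the dict gains the fresh key i+1 each
-- iteration, so the insertion-order association list grows by a plain append
def loopA (cs : List Char) : Nat → Nat → Nat → List (Int × Int) → List (Int × Int)
  | _, 0, _, acc => acc
  | i, rem + 1, gaps, acc =>
      let j := skipGapsA cs (i + gaps)
      loopA cs (i + 1) rem (gaps + (j - (i + gaps))) (acc ++ [((i : Int) + 1, (j : Int) + 1)])

def align_seq_to_aln (sequence : String) (alignment : String) : List (Int × Int) :=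
  loopA alignment.toList 0 sequence.toList.length 0 []

-- ===== PORT B =====
def align_seq_to_aln_alt (sequence : String) (alignment : String) : List (Int × Int) :=
  -- positions = [j + 1 for j, ch in enumerate(alignment) if ch != '-']
  let positions : List Int :=
    (PySem.List.enumerate alignment.toList 0).filterMap
      (fun p => if p.2 ≠ '-' then some (p.1 + 1) else none)
  -- {i + 1: positions[i] for i in range(len(sequence))}; positions[i] is in range within
  -- Pre_ (Python raises IndexError outside Pre_), so getD's default is never used there
  (List.range sequence.toList.length).map (fun (i : Nat) => ((i : Int) + 1, positions.getD i 0))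

-- ===== PRECONDITION & SPEC =====
-- Pre_ excludes exactly the inputs where the alignment has fewer non-gap characters than
-- len(sequence): there Python A raises IndexError (and Python B raises IndexError too).
def Pre_align_seq_to_aln (sequence : String) (alignment : String) : Prop :=
  sequence.toList.length ≤ (alignment.toList.filter (fun c => c ≠ '-')).length
instance (sequence : String) (alignment : String) : Decidable (Pre_align_seq_to_aln sequence alignment) := by
  unfold Pre_align_seq_to_aln; infer_instance
def pvWitness_align_seq_to_aln : String × String := ("ab", "-a-b-")

def Spec_align_seq_to_aln (sequence : String) (alignment : String) (out : List (Int × Int)) : Prop := out = align_seq_to_aln_alt sequence alignment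
instance (sequence : String) (alignment : String) (out : List (Int × Int)) : Decidable (Spec_align_seq_to_aln sequence alignment out) := by unfold Spec_align_seq_to_aln; infer_instance

-- ===== CLAIM (what is proved, stated in full; the proofs are below) =====
def Claim_equal_align_seq_to_aln : Prop := ∀ (sequence : String) (alignment : String), Dom_align_seq_to_aln sequence alignment → Pre_align_seq_to_aln sequence alignment → Spec_align_seq_to_aln sequence alignment (align_seq_to_aln sequence alignment)

-- ===== LEMMAS AND PROOFS =====

-- the 0-based non-gap column indices of cs at positions ≥ s, in increasing order
def ng (cs : List Char) (s : Nat) : List Nat :=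
  if h : s < cs.length then
    if cs[s] = '-' then ng cs (s + 1) else s :: ng cs (s + 1)
  else []
termination_by cs.length - s

-- head/tail characterisation of ng matching one step of A's inner while loop
lemma ng_cons (cs : List Char) (s : Nat) :
    ∀ {p : Nat} {rest : List Nat}, ng cs s = p :: rest →
      skipGapsA cs s = p ∧ ng cs (p + 1) = rest ∧ s ≤ p := by
  fun_induction ng cs s with
  | case1 s hs hg ih =>
    intro p rest h
    rw [skipGapsA, dif_pos hs, if_pos hg]
    obtain ⟨h1, h2, h3⟩ := ih h
    exact ⟨h1, h2, le_trans (Nat.le_succ s) h3⟩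
  | case2 s hs hg ih =>
    intro p rest h
    rw [skipGapsA, dif_pos hs, if_neg hg]
    injection h with h1 h2
    exact ⟨h1, h1 ▸ h2, Nat.le_of_eq h1⟩
  | case3 s hs =>
    intro p rest h
    exact absurd h (by simp)

-- main loop invariant for A's outer for loop
lemma loopA_eq (cs : List Char) :
    ∀ (rem i gaps : Nat) (acc : List (Int × Int)),
      ng cs (i + gaps) = (ng cs 0).drop i →
      i + rem ≤ (ng cs 0).length →
      loopA cs i rem gaps acc =
        acc ++ (List.range' i rem).map
          (fun (k : Nat) => ((k : Int) + 1, ((ng cs 0).getD k 0 : Int) + 1)) := by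
  intro rem
  induction rem with
  | zero => intro i gaps acc _ _; simp [loopA]
  | succ r ih =>
    intro i gaps acc hdrop hlen
    have hi : i < (ng cs 0).length := by omega
    have hdropne : (ng cs 0).drop i = (ng cs 0)[i] :: (ng cs 0).drop (i + 1) :=
      List.drop_eq_getElem_cons hi
    rw [hdropne] at hdrop
    obtain ⟨hskip, htail, hle⟩ := ng_cons cs (i + gaps) hdrop
    have hgetD : (ng cs 0).getD i 0 = (ng cs 0)[i] := List.getD_eq_getElem _ _ hi
    rw [loopA]
    have hnew : (i + 1) + (gaps + (skipGapsA cs (i + gaps) - (i + gaps))) = (ng cs 0)[i] + 1 := by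
      rw [hskip]; omega
    rw [ih (i + 1) (gaps + (skipGapsA cs (i + gaps) - (i + gaps)))
         (acc ++ [((i : Int) + 1, ((skipGapsA cs (i + gaps) : Int)) + 1)])
         (by rw [hnew, htail]) (by omega)]
    rw [List.range'_succ, List.map_cons, hskip, hgetD]
    simp

-- ng cs 0 has exactly one entry per non-gap character
lemma ng_length (cs : List Char) (s : Nat) :
    (ng cs s).length = ((cs.drop s).filter (fun c => c ≠ '-')).length := by
  fun_induction ng cs s with
  | case1 s hs hg ih =>
    rw [ih, List.drop_eq_getElem_cons hs, List.filter_cons]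
    simp [hg]
  | case2 s hs hg ih =>
    rw [List.drop_eq_getElem_cons hs, List.filter_cons]
    simp only [hg, ne_eq, not_false_iff, decide_true, if_true, List.length_cons, ih]
  | case3 s hs =>
    rw [List.drop_eq_nil_of_le (by omega)]
    simp

-- structural version of ng, to connect with enumerate
def ngS : List Char → Nat → List Nat
  | [], _ => []
  | c :: cs, k => if c = '-' then ngS cs (k + 1) else k :: ngS cs (k + 1)

lemma ng_eq_ngS (cs : List Char) (s : Nat) : ng cs s = ngS (cs.drop s) s := by
  fun_induction ng cs s with
  | case1 s hs hg ih =>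
    rw [List.drop_eq_getElem_cons hs, ngS, if_pos hg, ih]
  | case2 s hs hg ih =>
    rw [List.drop_eq_getElem_cons hs, ngS, if_neg hg, ih]
  | case3 s hs =>
    rw [List.drop_eq_nil_of_le (by omega), ngS]

-- B's positions list is the (1-based, Int) image of ng cs 0
lemma filterMap_enumerate_eq (cs : List Char) (k : Nat) :
    (PySem.List.enumerate cs (k : Int)).filterMap
      (fun p => if p.2 ≠ '-' then some (p.1 + 1) else none) =
    (ngS cs k).map (fun (t : Nat) => (t : Int) + 1) := by
  induction cs generalizing k with
  | nil => simp [PySem.List.enumerate_nil, ngS]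
  | cons c cs ih =>
    rw [PySem.List.enumerate_cons, List.filterMap_cons, ngS]
    by_cases hc : c = '-'
    · simp only [hc, ne_eq, not_true_eq_false, if_false, if_true]
      have : ((k : Int) + 1) = ((k + 1 : Nat) : Int) := by push_cast; ring
      rw [this, ih]
    · simp only [ne_eq, hc, not_false_iff, if_true, if_false, List.map_cons]
      have : ((k : Int) + 1) = ((k + 1 : Nat) : Int) := by push_cast; ring
      rw [this, ih]

lemma positions_eq (cs : List Char) :
    (PySem.List.enumerate cs 0).filterMap
      (fun p => if p.2 ≠ '-' then some (p.1 + 1) else none) =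
    (ng cs 0).map (fun (t : Nat) => (t : Int) + 1) := by
  have h0 : (0 : Int) = ((0 : Nat) : Int) := rfl
  rw [ng_eq_ngS, List.drop_zero, h0, filterMap_enumerate_eq]

-- ===== VERDICT (by name: the statement is the Claim_ definition above) =====
theorem align_seq_to_aln_spec : Claim_equal_align_seq_to_aln := by
  intro sequence alignment _ hpre
  unfold Spec_align_seq_to_aln align_seq_to_aln align_seq_to_aln_alt
  set cs := alignment.toList
  set n := sequence.toList.length
  have hlen : n ≤ (ng cs 0).length := by
    rw [ng_length cs 0, List.drop_zero]; exact hpre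
  rw [loopA_eq cs n 0 0 [] (by simp) (by omega), positions_eq, List.nil_append,
    List.range_eq_range']
  apply List.map_congr_left
  intro i hi
  have hi' : i < (ng cs 0).length := by
    have := List.mem_range'.mp hi; omega
  have : ((ng cs 0).map (fun (t : Nat) => (t : Int) + 1)).getD i 0 = ((ng cs 0)[i] : Int) + 1 := by
    rw [List.getD_eq_getElem?_getD, List.getElem?_map, List.getElem?_eq_getElem hi']
    rfl
  rw [this, List.getD_eq_getElem _ _ hi']
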